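-- pv_equiv track=rewrite | github.com/foets/AI-CV-Assistant | studio/tools.py | _fix_markdown_line_breaks
-- ===== SOURCE A (Python) =====
-- def _fix_markdown_line_breaks(content: str) -> str:
--     """Automatically fix markdown line breaks by adding two spaces where needed.
--
--     This ensures proper PDF rendering even if the LLM forgets to add trailing spaces.
--     """
--     lines = content.split('\n')
--     fixed_lines = []
--
--     in_header = False
--     in_skills = False
--     in_education = False
--
--     for i, line in enumerate(lines):
--         # Detect sections
--         if line.startswith('# '):  # Name line
--             in_header = True
--             in_skills = False
--             in_education = False
--         elif line.startswith('## SKILLS'):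
--             in_skills = True
--             in_header = False
--             in_education = False
--         elif line.startswith('## EDUCATION'):
--             in_education = True
--             in_skills = False
--             in_header = False
--         elif line.startswith('## '):  # Other section
--             in_header = False
--             in_skills = False
--             in_education = False
--
--         # Add two spaces to lines that need them
--         next_line = lines[i + 1] if i + 1 < len(lines) else ''
--
--         # Header section: name, title, contact lines (before first ----)
--         if in_header and line.strip() and not line.startswith('---') and not line.startswith('##'):
--             # LinkedIn/last header line should get spaces too if followed by blank line then ---
--             next_next_line = lines[i + 2] if i + 2 < len(lines) else ''
--             should_add_spaces = (
--                 (next_line.strip() and not next_line.startswith('---')) or  # Another header line follows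
--                 (not next_line.strip() and next_next_line.startswith('---'))  # Blank line then separator
--             )
--             if should_add_spaces and not line.endswith('  '):
--                 line = line.rstrip() + '  '
--
--         # Skills section: Competencies, Soft Skills, Tools, Languages lines
--         elif in_skills and line.startswith('**') and ':' in line:
--             # Add two spaces to all skill category lines except the last one
--             next_is_skill_line = next_line.startswith('**') and ':' in next_line
--             if next_is_skill_line and not line.endswith('  '):
--                 line = line.rstrip() + '  '
--
--         # Education section: degree lines
--         elif in_education and line.startswith('**'):
--             if not line.endswith('  ') and next_line.startswith('**'):
--                 line = line.rstrip() + '  '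
--
--         fixed_lines.append(line)
--
--     return '\n'.join(fixed_lines)
-- ===== SOURCE B (Python) =====
-- def _section_at(lines, i):
--     """Section of line i = classification of the nearest heading at or before i
--     (stateless backward search; no carried flags)."""
--     while i >= 0:
--         l = lines[i]
--         if l.startswith('# '):
--             return 'header'
--         if l.startswith('## SKILLS'):
--             return 'skills'
--         if l.startswith('## EDUCATION'):
--             return 'education'
--         if l.startswith('## '):
--             return 'other'
--         i -= 1
--     return 'other'
--
--
-- def _fix_line(sec, line, nxt, nn):
--     if sec == 'header' and line.strip() and not line.startswith('---') and not line.startswith('##'):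
--         if ((nxt.strip() and not nxt.startswith('---')) or
--                 (not nxt.strip() and nn.startswith('---'))) and not line.endswith('  '):
--             return line.rstrip() + '  '
--     elif sec == 'skills' and line.startswith('**') and ':' in line:
--         if nxt.startswith('**') and ':' in nxt and not line.endswith('  '):
--             return line.rstrip() + '  '
--     elif sec == 'education' and line.startswith('**'):
--         if not line.endswith('  ') and nxt.startswith('**'):
--             return line.rstrip() + '  '
--     return line
--
--
-- def _fix_markdown_line_breaks(content: str) -> str:
--     """Stateless formulation: each output line is a pure function of the line,
--     its two successors, and the nearest preceding heading (found by backward search)."""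
--     lines = content.split('\n')
--     n = len(lines)
--     return '\n'.join(
--         _fix_line(_section_at(lines, i), lines[i],
--                   lines[i + 1] if i + 1 < n else '',
--                   lines[i + 2] if i + 2 < n else '')
--         for i in range(n))
-- ===== Notes on version B (the rewrite author's own statement) =====
-- stated objective: alternative
-- what changed: Replaces A's stateful pass that mutates three section flags while emitting with a stateless formulation: each line's section is determined independently by a backward search for the nearest preceding heading, and a pure per-line fixer is mapped over the indices.
import Mathlib
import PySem

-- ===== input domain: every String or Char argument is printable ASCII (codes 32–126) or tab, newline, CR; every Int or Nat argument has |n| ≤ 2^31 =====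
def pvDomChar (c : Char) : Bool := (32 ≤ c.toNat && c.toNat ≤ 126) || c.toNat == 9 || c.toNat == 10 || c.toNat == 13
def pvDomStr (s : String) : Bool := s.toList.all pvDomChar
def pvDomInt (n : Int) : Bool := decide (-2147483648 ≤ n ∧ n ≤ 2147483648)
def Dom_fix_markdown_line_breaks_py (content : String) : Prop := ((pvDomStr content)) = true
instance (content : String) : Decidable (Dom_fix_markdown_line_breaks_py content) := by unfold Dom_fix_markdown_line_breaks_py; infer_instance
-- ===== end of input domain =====

-- B replaces A's stateful flag-carrying pass by a stateless formulation: each line's section is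
-- found by a backward search for the nearest preceding heading, and a pure per-line fixer is
-- mapped over the indices (alternative decomposition; not claimed faster).

-- ===== PORT A =====
-- literal transliteration of the Python loop: state = three flags + accumulator, one step per enumerated line
def fixA_loop (lines : List String) :
    List (Int × String) → Bool → Bool → Bool → List String → List String
  | [], _, _, _, acc => acc
  | (i, line) :: rest, inHeader0, inSkills0, inEducation0, acc =>
    let flags :=
      if PySem.Str.startswith line "# " then (true, false, false)
      else if PySem.Str.startswith line "## SKILLS" then (false, true, false)
      else if PySem.Str.startswith line "## EDUCATION" then (false, false, true)
      else if PySem.Str.startswith line "## " then (false, false, false)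
      else (inHeader0, inSkills0, inEducation0)
    let next_line := if i + 1 < (lines.length : Int) then PySem.List.pyGetD lines (i + 1) "" else ""
    let line' :=
      if flags.1 && !(PySem.Str.strip line == "") && !(PySem.Str.startswith line "---")
          && !(PySem.Str.startswith line "##") then
        let next_next_line := if i + 2 < (lines.length : Int) then PySem.List.pyGetD lines (i + 2) "" else ""
        let should_add_spaces :=
          (!(PySem.Str.strip next_line == "") && !(PySem.Str.startswith next_line "---"))
          || ((PySem.Str.strip next_line == "") && PySem.Str.startswith next_next_line "---")
        if should_add_spaces && !(PySem.Str.endswith line "  ") then PySem.Str.rstrip line ++ "  " else line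
      else if flags.2.1 && PySem.Str.startswith line "**" && PySem.Str.isIn ":" line then
        let next_is_skill_line := PySem.Str.startswith next_line "**" && PySem.Str.isIn ":" next_line
        if next_is_skill_line && !(PySem.Str.endswith line "  ") then PySem.Str.rstrip line ++ "  " else line
      else if flags.2.2 && PySem.Str.startswith line "**" then
        if !(PySem.Str.endswith line "  ") && PySem.Str.startswith next_line "**" then
          PySem.Str.rstrip line ++ "  "
        else line
      else line
    fixA_loop lines rest flags.1 flags.2.1 flags.2.2 (acc ++ [line'])

def fix_markdown_line_breaks_py (content : String) : String :=
  -- content.split('\n'): sep is the nonempty literal "\n", so split? is always some; the [] default is unreachable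
  let lines := (PySem.Str.split? content "\n").getD []
  PySem.Str.join "\n" (fixA_loop lines (PySem.List.enumerate lines 0) false false false [])

-- ===== PORT B =====
-- backward search for the nearest heading at or before index i (port of _section_at;
-- the Python while-loop counting i down becomes structural recursion on i)
def sectionAtB (lines : List String) : Nat → String
  | 0 =>
    let l := PySem.List.pyGetD lines ((0 : Nat) : Int) ""
    if PySem.Str.startswith l "# " then "header"
    else if PySem.Str.startswith l "## SKILLS" then "skills"
    else if PySem.Str.startswith l "## EDUCATION" then "education"
    else if PySem.Str.startswith l "## " then "other"
    else "other"
  | i + 1 =>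
    let l := PySem.List.pyGetD lines ((i + 1 : Nat) : Int) ""
    if PySem.Str.startswith l "# " then "header"
    else if PySem.Str.startswith l "## SKILLS" then "skills"
    else if PySem.Str.startswith l "## EDUCATION" then "education"
    else if PySem.Str.startswith l "## " then "other"
    else sectionAtB lines i

-- pure per-line fixer (port of _fix_line)
def fixLineB (sec line nxt nn : String) : String :=
  if (sec == "header") && !(PySem.Str.strip line == "") && !(PySem.Str.startswith line "---")
      && !(PySem.Str.startswith line "##") then
    if ((!(PySem.Str.strip nxt == "") && !(PySem.Str.startswith nxt "---"))
        || ((PySem.Str.strip nxt == "") && PySem.Str.startswith nn "---"))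
        && !(PySem.Str.endswith line "  ") then
      PySem.Str.rstrip line ++ "  "
    else line
  else if (sec == "skills") && PySem.Str.startswith line "**" && PySem.Str.isIn ":" line then
    if PySem.Str.startswith nxt "**" && PySem.Str.isIn ":" nxt && !(PySem.Str.endswith line "  ") then
      PySem.Str.rstrip line ++ "  "
    else line
  else if (sec == "education") && PySem.Str.startswith line "**" then
    if !(PySem.Str.endswith line "  ") && PySem.Str.startswith nxt "**" then
      PySem.Str.rstrip line ++ "  "
    else line
  else line

def fix_markdown_line_breaks_py_alt (content : String) : String :=
  -- content.split('\n'): sep is the nonempty literal "\n", so split? is always some; the [] default is unreachable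
  let lines := (PySem.Str.split? content "\n").getD []
  let n := lines.length
  PySem.Str.join "\n"
    ((List.range n).map (fun i =>
      fixLineB (sectionAtB lines i) (PySem.List.pyGetD lines (i : Int) "")
        (if i + 1 < n then PySem.List.pyGetD lines ((i + 1 : Nat) : Int) "" else "")
        (if i + 2 < n then PySem.List.pyGetD lines ((i + 2 : Nat) : Int) "" else "")))

-- ===== PRECONDITION & SPEC =====
def Spec_fix_markdown_line_breaks_py (content : String) (out : String) : Prop := out = fix_markdown_line_breaks_py_alt content
instance (content : String) (out : String) : Decidable (Spec_fix_markdown_line_breaks_py content out) := by unfold Spec_fix_markdown_line_breaks_py; infer_instance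

-- ===== CLAIM (what is proved, stated in full; the proofs are below) =====
def Claim_equal_fix_markdown_line_breaks_py : Prop := ∀ (content : String), Dom_fix_markdown_line_breaks_py content → Spec_fix_markdown_line_breaks_py content (fix_markdown_line_breaks_py content)

-- ===== LEMMAS AND PROOFS =====

-- the one-line section-update step (A's flag update, abstractly)
def stepB (cur line : String) : String :=
  if PySem.Str.startswith line "# " then "header"
  else if PySem.Str.startswith line "## SKILLS" then "skills"
  else if PySem.Str.startswith line "## EDUCATION" then "education"
  else if PySem.Str.startswith line "## " then "other"
  else cur

-- the three A-flags encoded by a section label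
def flagsOf (c : String) : Bool × Bool × Bool :=
  if c == "header" then (true, false, false)
  else if c == "skills" then (false, true, false)
  else if c == "education" then (false, false, true)
  else (false, false, false)

-- common specification: recursion over the lines, carrying the section label
def specLoop : List String → String → List String
  | [], _ => []
  | line :: rest, cur =>
    let cur' := stepB cur line
    fixLineB cur' line (rest.headD "") ((rest.drop 1).headD "") :: specLoop rest cur'

lemma flagsOf_step (cur line : String) :
    (if PySem.Str.startswith line "# " then (true, false, false)
     else if PySem.Str.startswith line "## SKILLS" then (false, true, false)
     else if PySem.Str.startswith line "## EDUCATION" then (false, false, true)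
     else if PySem.Str.startswith line "## " then (false, false, false)
     else ((flagsOf cur).1, (flagsOf cur).2.1, (flagsOf cur).2.2))
    = flagsOf (stepB cur line) := by
  unfold stepB
  split_ifs <;> simp [flagsOf]

-- A's inline emit expression, under flags = flagsOf c, is exactly fixLineB c
lemma emit_eq (c line nxt nn : String) :
    (if (flagsOf c).1 && !(PySem.Str.strip line == "") && !(PySem.Str.startswith line "---")
        && !(PySem.Str.startswith line "##") then
      if ((!(PySem.Str.strip nxt == "") && !(PySem.Str.startswith nxt "---"))
          || ((PySem.Str.strip nxt == "") && PySem.Str.startswith nn "---"))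
          && !(PySem.Str.endswith line "  ") then PySem.Str.rstrip line ++ "  " else line
    else if (flagsOf c).2.1 && PySem.Str.startswith line "**" && PySem.Str.isIn ":" line then
      if PySem.Str.startswith nxt "**" && PySem.Str.isIn ":" nxt
          && !(PySem.Str.endswith line "  ") then PySem.Str.rstrip line ++ "  " else line
    else if (flagsOf c).2.2 && PySem.Str.startswith line "**" then
      if !(PySem.Str.endswith line "  ") && PySem.Str.startswith nxt "**" then
        PySem.Str.rstrip line ++ "  "
      else line
    else line)
    = fixLineB c line nxt nn := by
  by_cases h1 : c = "header"
  · simp [flagsOf, fixLineB, h1]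
  · by_cases h2 : c = "skills"
    · simp [flagsOf, fixLineB, h2]
    · by_cases h3 : c = "education"
      · simp [flagsOf, fixLineB, h3]
      · simp [flagsOf, fixLineB, h1, h2, h3]

-- guarded Python indexing lines[k+j] (Int guard, A's form) is head-of-drop
lemma idx_eq (L : List String) (k j : Nat) :
    (if (k : Int) + (j : Int) < (L.length : Int) then PySem.List.pyGetD L ((k : Int) + (j : Int)) "" else "")
    = (L.drop (k + j)).headD "" := by
  have hc : (k : Int) + (j : Int) = ((k + j : Nat) : Int) := by push_cast; ring
  rw [hc]
  by_cases h : k + j < L.length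
  · rw [if_pos (by exact_mod_cast h)]
    rw [PySem.List.pyGetD_natCast]
    rw [List.getD_eq_getElem?_getD, List.headD_eq_head?_getD, List.head?_drop]
  · rw [if_neg (by exact_mod_cast h)]
    rw [List.drop_eq_nil_of_le (by omega)]
    rfl

-- the same for B's Nat-guarded indexing; also unguarded pyGetD, since the default is ""
lemma idxN_eq (L : List String) (k : Nat) :
    PySem.List.pyGetD L (k : Int) "" = (L.drop k).headD "" := by
  rw [PySem.List.pyGetD_natCast]
  rw [List.getD_eq_getElem?_getD, List.headD_eq_head?_getD, List.head?_drop]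

lemma idxN_guard_eq (L : List String) (k : Nat) :
    (if k < L.length then PySem.List.pyGetD L (k : Int) "" else "") = (L.drop k).headD "" := by
  by_cases h : k < L.length
  · rw [if_pos h, idxN_eq]
  · rw [if_neg h, List.drop_eq_nil_of_le (by omega)]; rfl

-- A's loop on the suffix starting at index k computes specLoop
lemma lemA (L : List String) :
    ∀ (M : List String) (k : Nat) (cur : String) (acc : List String), L.drop k = M →
      fixA_loop L (PySem.List.enumerate M (k : Int)) (flagsOf cur).1 (flagsOf cur).2.1
        (flagsOf cur).2.2 acc = acc ++ specLoop M cur := by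
  intro M
  induction M with
  | nil => intro k cur acc _; simp [PySem.List.enumerate_nil, fixA_loop, specLoop]
  | cons line rest ih =>
    intro k cur acc hM
    have hdrop : L.drop (k + 1) = rest := by
      have h1 : (L.drop k).tail = L.drop (k + 1) := List.tail_drop
      rw [hM] at h1; exact h1.symm ▸ rfl
    rw [PySem.List.enumerate_cons]
    rw [fixA_loop]
    simp only [flagsOf_step]
    have e1 := idx_eq L k 1
    have e2 := idx_eq L k 2
    rw [hdrop] at e1
    have hdrop2 : L.drop (k + 2) = rest.drop 1 := by
      have h1 : (L.drop (k + 1)).tail = L.drop (k + 1 + 1) := List.tail_drop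
      rw [hdrop] at h1
      rw [show k + 1 + 1 = k + 2 from rfl] at h1
      rw [← h1, List.drop_one]
    rw [hdrop2] at e2
    simp only [Nat.cast_one, Nat.cast_ofNat] at e1 e2
    rw [e1, e2, emit_eq]
    have henum : (k : Int) + 1 = ((k + 1 : Nat) : Int) := by push_cast; ring
    rw [henum, ih (k + 1) (stepB cur line)
      (acc ++ [fixLineB (stepB cur line) line (rest.headD "") ((rest.drop 1).headD "")]) hdrop]
    simp [specLoop]

-- the section label at index k computed "from the left": cfun L 0 = "other", afterwards the state just before line k
def cfun (L : List String) : Nat → String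
  | 0 => "other"
  | k + 1 => sectionAtB L k

-- backward search = one step from the state before the line
lemma sectionAtB_step (L : List String) (k : Nat) :
    sectionAtB L k = stepB (cfun L k) (PySem.List.pyGetD L (k : Int) "") := by
  cases k with
  | zero => simp [sectionAtB, cfun, stepB]
  | succ i => simp [sectionAtB, cfun, stepB]

-- B's indexed map over the suffix starting at k computes specLoop
lemma lemB (L : List String) :
    ∀ (M : List String) (k : Nat), L.drop k = M →
      (List.range' k M.length).map (fun i =>
        fixLineB (sectionAtB L i) (PySem.List.pyGetD L (i : Int) "")
          (if i + 1 < L.length then PySem.List.pyGetD L ((i + 1 : Nat) : Int) "" else "")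
          (if i + 2 < L.length then PySem.List.pyGetD L ((i + 2 : Nat) : Int) "" else ""))
      = specLoop M (cfun L k) := by
  intro M
  induction M with
  | nil => intro k _; simp [specLoop]
  | cons line rest ih =>
    intro k hM
    have hk : k < L.length := by
      by_contra h
      rw [List.drop_eq_nil_of_le (by omega)] at hM
      simp at hM
    have hdrop : L.drop (k + 1) = rest := by
      have h1 : (L.drop k).tail = L.drop (k + 1) := List.tail_drop
      rw [hM] at h1; exact h1.symm ▸ rfl
    have hdrop2 : L.drop (k + 2) = rest.drop 1 := by
      have h1 : (L.drop (k + 1)).tail = L.drop (k + 1 + 1) := List.tail_drop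
      rw [hdrop] at h1
      rw [show k + 1 + 1 = k + 2 from rfl] at h1
      rw [← h1, List.drop_one]
    have hline : PySem.List.pyGetD L (k : Int) "" = line := by
      rw [idxN_eq, hM]; rfl
    simp only [List.length_cons]
    rw [List.range'_succ, List.map_cons]
    have e1 := idxN_guard_eq L (k + 1); rw [hdrop] at e1
    have e2 := idxN_guard_eq L (k + 2); rw [hdrop2] at e2
    rw [specLoop]
    have hsec : sectionAtB L k = stepB (cfun L k) line := by
      rw [sectionAtB_step, hline]
    have hcf : cfun L (k + 1) = sectionAtB L k := rfl
    rw [e1, e2, hline, hsec, ih (k + 1) hdrop, hcf, hsec]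

-- the two pipelines agree
lemma lists_eq (L : List String) :
    fixA_loop L (PySem.List.enumerate L 0) false false false []
      = (List.range L.length).map (fun i =>
          fixLineB (sectionAtB L i) (PySem.List.pyGetD L (i : Int) "")
            (if i + 1 < L.length then PySem.List.pyGetD L ((i + 1 : Nat) : Int) "" else "")
            (if i + 2 < L.length then PySem.List.pyGetD L ((i + 2 : Nat) : Int) "" else "")) := by
  have hfl : flagsOf "other" = (false, false, false) := by decide
  have hA := lemA L L 0 "other" [] (by simp)
  rw [hfl] at hA
  simp only [List.nil_append] at hA
  rw [show ((0 : Nat) : Int) = (0 : Int) from rfl] at hA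
  have hB := lemB L L 0 (by simp)
  rw [List.range_eq_range']
  rw [hA, hB]
  rfl

-- ===== VERDICT (by name: the statement is the Claim_ definition above) =====
theorem fix_markdown_line_breaks_py_spec : Claim_equal_fix_markdown_line_breaks_py := by
  unfold Claim_equal_fix_markdown_line_breaks_py
  intro content _
  unfold Spec_fix_markdown_line_breaks_py
  unfold fix_markdown_line_breaks_py fix_markdown_line_breaks_py_alt
  exact congrArg (PySem.Str.join "\n") (lists_eq ((PySem.Str.split? content "\n").getD []))
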